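-- pv_equiv track=rewrite | github.com/uriel2121ger-art/posvendelo | frontend/fix_tabs.py | remove_header
-- ===== SOURCE A (Python) =====
-- def remove_header(text):
--     start_str = '<div className="border-b border-zinc-800 bg-zinc-900 px-4 py-3">'
--     start_idx = text.find(start_str)
--     if start_idx == -1: return text
--
--     depth = 0
--     i = start_idx
--     while i < len(text):
--         if text.startswith('<div', i):
--             depth += 1
--             i += 4
--         elif text.startswith('</div', i):
--             depth -= 1
--             if depth == 0:
--                 end_idx = text.find('>', i) + 1
--                 return text[:start_idx] + text[end_idx:]
--             i += 5
--         else: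
--             i += 1
--     return text
-- ===== SOURCE B (Python) =====
-- def _occurrences(text, pat, j):
--     out = []
--     j = text.find(pat, j)
--     while j != -1:
--         out.append(j)
--         j = text.find(pat, j + 1)
--     return out
--
-- def remove_header(text):
--     start_str = '<div className="border-b border-zinc-800 bg-zinc-900 px-4 py-3">'
--     start_idx = text.find(start_str)
--     if start_idx == -1:
--         return text
--     tokens = [(j, 1) for j in _occurrences(text, '<div', start_idx)]
--     tokens += [(j, -1) for j in _occurrences(text, '</div', start_idx)]
--     tokens.sort(key=lambda t: t[0])
--     depth = 0
--     for j, delta in tokens: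
--         depth += delta
--         if delta == -1 and depth == 0:
--             end_idx = text.find('>', j) + 1
--             return text[:start_idx] + text[end_idx:]
--     return text
-- ===== Notes on version B (the rewrite author's own statement) =====
-- stated objective: alternative
-- what changed: B collects all '<div'/'</div' offsets after the anchor with repeated str.find, sorts the merged (position, +/-1) token list and folds a depth counter over it, instead of A's per-character skip-scan state machine.
import Mathlib
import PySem

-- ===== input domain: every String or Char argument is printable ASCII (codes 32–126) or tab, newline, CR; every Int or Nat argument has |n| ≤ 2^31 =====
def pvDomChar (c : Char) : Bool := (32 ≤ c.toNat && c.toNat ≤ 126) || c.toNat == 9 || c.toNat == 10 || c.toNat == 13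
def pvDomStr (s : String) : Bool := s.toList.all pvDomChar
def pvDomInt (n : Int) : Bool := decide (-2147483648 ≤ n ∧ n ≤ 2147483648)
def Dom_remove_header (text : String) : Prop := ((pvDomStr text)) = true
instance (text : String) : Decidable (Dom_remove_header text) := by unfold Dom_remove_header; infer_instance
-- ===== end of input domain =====

-- B replaces A's per-character skip-scan by: collect all tag offsets via repeated find, sort the merged token list, fold a depth counter (objective: alternative algorithm, same cost class).

-- ===== PORT A =====
-- the while-loop of A: i scans forward, depth counts open/close tags
def removeHeaderScanA (text : String) (st : Nat) (i : Nat) (depth : Int) : String :=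
  if _h : i < text.toList.length then
    if PySem.Chars.startswith (text.toList.drop i) "<div".toList then
      removeHeaderScanA text st (i + 4) (depth + 1)
    else if PySem.Chars.startswith (text.toList.drop i) "</div".toList then
      let depth' := depth - 1
      if depth' == 0 then
        let endIdx := PySem.Chars.findFrom text.toList ">".toList (i : Int) none + 1
        String.ofList (PySem.List.slice text.toList none (some (st : Int)) ++
                       PySem.List.slice text.toList (some endIdx) none)
      else removeHeaderScanA text st (i + 5) depth'
    else removeHeaderScanA text st (i + 1) depth
  else text
termination_by text.toList.length - i
decreasing_by all_goals omega

def remove_header (text : String) : String :=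
  let startIdx := PySem.Str.find text "<div className=\"border-b border-zinc-800 bg-zinc-900 px-4 py-3\">"
  if startIdx == -1 then text
  else removeHeaderScanA text startIdx.toNat startIdx.toNat 0

-- ===== PORT B =====
-- _occurrences: repeated text.find(pat, j) collecting all match offsets
-- (the 'j ≤ length' guard only makes the recursion total: Python's find from a start past the end returns -1 as well)
def removeHeaderOccs (cs pat : List Char) (j : Nat) : List Nat :=
  if hj : j ≤ cs.length then
    if hr : PySem.Chars.findFrom cs pat (j : Int) none = -1 then []
    else (PySem.Chars.findFrom cs pat (j : Int) none).toNat
           :: removeHeaderOccs cs pat ((PySem.Chars.findFrom cs pat (j : Int) none).toNat + 1)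
  else []
termination_by cs.length + 1 - j
decreasing_by
  have h1 := (PySem.Chars.findFrom_natCast_spec cs pat j hj hr).1
  omega

-- the for-loop of B over the sorted token list
def removeHeaderStep (cs : List Char) (st : Nat) (orig : String) : List (Nat × Int) → Int → String
  | [], _ => orig
  | (j, delta) :: rest, depth =>
    let depth' := depth + delta
    if delta == -1 && depth' == 0 then
      let endIdx := PySem.Chars.findFrom cs ">".toList (j : Int) none + 1
      String.ofList (PySem.List.slice cs none (some (st : Int)) ++
                     PySem.List.slice cs (some endIdx) none)
    else removeHeaderStep cs st orig rest depth'

def remove_header_alt (text : String) : String :=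
  let startIdx := PySem.Str.find text "<div className=\"border-b border-zinc-800 bg-zinc-900 px-4 py-3\">"
  if startIdx == -1 then text
  else
    let cs := text.toList
    let st := startIdx.toNat
    let tokens := (removeHeaderOccs cs "<div".toList st).map (fun j => (j, (1 : Int)))
               ++ (removeHeaderOccs cs "</div".toList st).map (fun j => (j, (-1 : Int)))
    removeHeaderStep cs st text (PySem.List.sorted tokens (fun t => t.1) false) 0

-- ===== PRECONDITION & SPEC =====
def Spec_remove_header (text : String) (out : String) : Prop := out = remove_header_alt text
instance (text : String) (out : String) : Decidable (Spec_remove_header text out) := by unfold Spec_remove_header; infer_instance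

-- ===== CLAIM (what is proved, stated in full; the proofs are below) =====
def Claim_equal_remove_header : Prop := ∀ (text : String), Dom_remove_header text → Spec_remove_header text (remove_header text)

-- ===== LEMMAS AND PROOFS =====

-- the interleaved token stream from position j (proof-side characterisation)
def pvToks (cs : List Char) (j : Nat) : List (Nat × Int) :=
  if _h : j < cs.length then
    if PySem.Chars.startswith (cs.drop j) "<div".toList then (j, 1) :: pvToks cs (j + 1)
    else if PySem.Chars.startswith (cs.drop j) "</div".toList then (j, -1) :: pvToks cs (j + 1)
    else pvToks cs (j + 1)
  else []
termination_by cs.length - j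
decreasing_by all_goals omega

theorem pvToks_ge (cs : List Char) (j : Nat) (h : cs.length ≤ j) : pvToks cs j = [] := by
  unfold pvToks; rw [dif_neg (by omega)]

theorem pvToks_open (cs : List Char) (j : Nat) (hlt : j < cs.length)
    (ho : PySem.Chars.startswith (cs.drop j) "<div".toList = true) :
    pvToks cs j = (j, 1) :: pvToks cs (j + 1) := by
  rw [pvToks]; rw [dif_pos hlt, if_pos ho]

theorem pvToks_close (cs : List Char) (j : Nat) (hlt : j < cs.length)
    (ho : PySem.Chars.startswith (cs.drop j) "<div".toList = false)
    (hc : PySem.Chars.startswith (cs.drop j) "</div".toList = true) :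
    pvToks cs j = (j, -1) :: pvToks cs (j + 1) := by
  rw [pvToks]; rw [dif_pos hlt, if_neg (by rw [ho]; exact Bool.false_ne_true), if_pos hc]

theorem pvToks_none (cs : List Char) (j : Nat)
    (ho : PySem.Chars.startswith (cs.drop j) "<div".toList = false)
    (hc : PySem.Chars.startswith (cs.drop j) "</div".toList = false) :
    pvToks cs j = pvToks cs (j + 1) := by
  by_cases hlt : j < cs.length
  · rw [pvToks]
    rw [dif_pos hlt, if_neg (by rw [ho]; exact Bool.false_ne_true),
        if_neg (by rw [hc]; exact Bool.false_ne_true)]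
  · rw [pvToks_ge cs j (by omega), pvToks_ge cs (j + 1) (by omega)]

theorem pv_sw_head (cs pat : List Char) (j : Nat)
    (h : PySem.Chars.startswith (cs.drop j) pat = true) (k : Nat) (hk : k < pat.length) :
    cs[j + k]? = some pat[k] := by
  have hp := (PySem.Chars.startswith_iff _ _).mp h
  obtain ⟨t, ht⟩ := hp
  have : (cs.drop j)[k]? = some pat[k] := by
    rw [← ht]; rw [List.getElem?_append_left (by omega)]; simp [hk]
  rw [← this, List.getElem?_drop]

theorem pv_no_tag (cs : List Char) (j : Nat) (h : cs[j]? ≠ some '<') :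
    PySem.Chars.startswith (cs.drop j) "<div".toList = false ∧
    PySem.Chars.startswith (cs.drop j) "</div".toList = false := by
  constructor <;> {
    by_contra hc
    simp only [Bool.not_eq_false] at hc
    have := pv_sw_head cs _ j hc 0 (by decide)
    simp only [Nat.add_zero] at this
    exact h (by rw [this]; rfl) }

theorem pvToks_step (cs : List Char) (j : Nat)
    (h : cs[j]? ≠ some '<') : pvToks cs j = pvToks cs (j + 1) := by
  obtain ⟨h1, h2⟩ := pv_no_tag cs j h
  exact pvToks_none cs j h1 h2

theorem pv_not_both (cs : List Char) (j : Nat)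
    (h : PySem.Chars.startswith (cs.drop j) "<div".toList = true) :
    PySem.Chars.startswith (cs.drop j) "</div".toList = false := by
  by_contra hc
  simp only [Bool.not_eq_false] at hc
  have h1 := pv_sw_head cs _ j h 1 (by decide)
  have h2 := pv_sw_head cs _ j hc 1 (by decide)
  rw [h1] at h2; simp at h2

-- A's scan equals the fold over the interleaved token stream
theorem scanA_eq_step (text : String) (st : Nat) (i : Nat) (depth : Int) :
    removeHeaderScanA text st i depth
      = removeHeaderStep text.toList st text (pvToks text.toList i) depth := by
  by_cases hi : i < text.toList.length
  · by_cases ho : PySem.Chars.startswith (text.toList.drop i) "<div".toList = true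
    · have e1 : text.toList[i + 1]? = some 'd' := by
        have := pv_sw_head text.toList _ i ho 1 (by decide); rw [this]; rfl
      have e2 : text.toList[i + 2]? = some 'i' := by
        have := pv_sw_head text.toList _ i ho 2 (by decide); rw [this]; rfl
      have e3 : text.toList[i + 3]? = some 'v' := by
        have := pv_sw_head text.toList _ i ho 3 (by decide); rw [this]; rfl
      rw [pvToks_open text.toList i hi ho,
          pvToks_step text.toList (i+1) (by rw [e1]; simp),
          pvToks_step text.toList (i+2) (by rw [e2]; simp),
          pvToks_step text.toList (i+3) (by rw [e3]; simp)]
      conv_lhs => unfold removeHeaderScanA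
      rw [dif_pos hi, if_pos ho, scanA_eq_step text st (i + 4) (depth + 1)]
      show _ = removeHeaderStep text.toList st text ((i, 1) :: pvToks text.toList (i + 1 + 1 + 1 + 1)) depth
      simp only [removeHeaderStep]
      rw [if_neg (by simp)]
    · rw [Bool.not_eq_true] at ho
      by_cases hc : PySem.Chars.startswith (text.toList.drop i) "</div".toList = true
      · have e1 : text.toList[i + 1]? = some '/' := by
          have := pv_sw_head text.toList _ i hc 1 (by decide); rw [this]; rfl
        have e2 : text.toList[i + 2]? = some 'd' := by
          have := pv_sw_head text.toList _ i hc 2 (by decide); rw [this]; rfl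
        have e3 : text.toList[i + 3]? = some 'i' := by
          have := pv_sw_head text.toList _ i hc 3 (by decide); rw [this]; rfl
        have e4 : text.toList[i + 4]? = some 'v' := by
          have := pv_sw_head text.toList _ i hc 4 (by decide); rw [this]; rfl
        rw [pvToks_close text.toList i hi ho hc,
            pvToks_step text.toList (i+1) (by rw [e1]; simp),
            pvToks_step text.toList (i+2) (by rw [e2]; simp),
            pvToks_step text.toList (i+3) (by rw [e3]; simp),
            pvToks_step text.toList (i+4) (by rw [e4]; simp)]
        conv_lhs => unfold removeHeaderScanA
        rw [dif_pos hi, if_neg (by rw [ho]; exact Bool.false_ne_true), if_pos hc]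
        show (if (depth - 1) == 0 then _ else removeHeaderScanA text st (i + 5) (depth - 1))
          = removeHeaderStep text.toList st text ((i, -1) :: pvToks text.toList (i + 1 + 1 + 1 + 1 + 1)) depth
        simp only [removeHeaderStep]
        by_cases hd : depth - 1 = 0
        · have hb1 : ((depth - 1) == (0 : Int)) = true := by simpa using hd
          have hb2 : (((-1 : Int) == -1) && ((depth + -1) == (0 : Int))) = true := by
            simp only [Bool.and_eq_true, beq_iff_eq]
            refine ⟨by norm_num, by omega⟩
          simp only [hb1, hb2, if_true]
        · have hb1 : ((depth - 1) == (0 : Int)) = false := by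
            simp only [beq_eq_false_iff_ne, ne_eq]; omega
          have hb2 : (((-1 : Int) == -1) && ((depth + -1) == (0 : Int))) = false := by
            simp only [Bool.and_eq_false_iff, beq_eq_false_iff_ne, ne_eq]; right; omega
          simp only [hb1, hb2, Bool.false_eq_true, if_false]
          rw [scanA_eq_step text st (i + 5) (depth - 1)]
          have e5 : i + 1 + 1 + 1 + 1 + 1 = i + 5 := by omega
          have ed : depth + -1 = depth - 1 := by ring
          rw [e5, ed]
      · rw [Bool.not_eq_true] at hc
        rw [pvToks_none text.toList i ho hc]
        conv_lhs => unfold removeHeaderScanA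
        rw [dif_pos hi, if_neg (by rw [ho]; exact Bool.false_ne_true),
            if_neg (by rw [hc]; exact Bool.false_ne_true)]
        exact scanA_eq_step text st (i + 1) depth
  · rw [pvToks_ge text.toList i (by omega)]
    unfold removeHeaderScanA
    rw [dif_neg hi]
    rfl
termination_by text.toList.length - i
decreasing_by all_goals omega

-- findFrom at an exact match returns the start index
theorem pv_findFrom_of_prefix (cs pat : List Char) (j : Nat) (hj : j ≤ cs.length)
    (hp : pat <+: cs.drop j) : PySem.Chars.findFrom cs pat (j : Int) none = j := by
  rw [PySem.Chars.findFrom_natCast cs pat j hj]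
  have hnn : 0 ≤ PySem.Chars.find (cs.drop j) pat :=
    (PySem.Chars.find_nonneg_iff _ _).mpr (hp.isInfix)
  have hspec := PySem.Chars.find_spec hnn
  have h0 : (PySem.Chars.find (cs.drop j) pat).toNat = 0 := by
    by_contra hne
    exact hspec.2 0 (by omega) (by simpa using hp)
  have : PySem.Chars.find (cs.drop j) pat = 0 := by omega
  simp [this]

theorem pvOccs_eq_nil (cs pat : List Char) (j : Nat) (hj : j ≤ cs.length)
    (h : PySem.Chars.findFrom cs pat (j : Int) none = -1) :
    removeHeaderOccs cs pat j = [] := by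
  rw [removeHeaderOccs, dif_pos hj, dif_pos h]

theorem pvOccs_eq_cons (cs pat : List Char) (j : Nat) (hj : j ≤ cs.length)
    (h : PySem.Chars.findFrom cs pat (j : Int) none ≠ -1) :
    removeHeaderOccs cs pat j = (PySem.Chars.findFrom cs pat (j : Int) none).toNat
      :: removeHeaderOccs cs pat ((PySem.Chars.findFrom cs pat (j : Int) none).toNat + 1) := by
  rw [removeHeaderOccs, dif_pos hj, dif_neg h]

theorem pvOccs_match (cs pat : List Char) (j : Nat) (hj : j ≤ cs.length)
    (hp : pat <+: cs.drop j) :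
    removeHeaderOccs cs pat j = j :: removeHeaderOccs cs pat (j + 1) := by
  have hf := pv_findFrom_of_prefix cs pat j hj hp
  rw [pvOccs_eq_cons cs pat j hj (by rw [hf]; omega), hf]
  simp

theorem pv_infix_drop (cs pat : List Char) {m j : Nat} (hjm : j ≤ m)
    (hp : pat <+: cs.drop m) : pat <:+: cs.drop j := by
  have : cs.drop m = (cs.drop j).drop (m - j) := by rw [List.drop_drop]; congr 1; omega
  rw [this] at hp
  exact hp.isInfix.trans (List.drop_suffix _ _).isInfix

theorem pvOccs_nomatch (cs pat : List Char) (j : Nat) (hj : j < cs.length)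
    (hp : ¬ pat <+: cs.drop j) :
    removeHeaderOccs cs pat j = removeHeaderOccs cs pat (j + 1) := by
  have hj1 : j + 1 ≤ cs.length := hj
  by_cases h : PySem.Chars.findFrom cs pat (j : Int) none = -1
  · have hni : ¬ pat <:+: cs.drop j := (PySem.Chars.findFrom_natCast_eq_neg_one_iff cs pat j (by omega)).mp h
    have hni1 : ¬ pat <:+: cs.drop (j + 1) := by
      intro hc
      exact hni (hc.trans (by
        have hdd : cs.drop (j + 1) = (cs.drop j).drop 1 := by
          rw [List.drop_drop]
        rw [hdd]; exact (List.drop_suffix _ _).isInfix))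
    have h1 : PySem.Chars.findFrom cs pat (((j + 1 : Nat)) : Int) none = -1 :=
      (PySem.Chars.findFrom_natCast_eq_neg_one_iff cs pat (j + 1) hj1).mpr hni1
    rw [pvOccs_eq_nil cs pat j (by omega) h, pvOccs_eq_nil cs pat (j + 1) hj1 h1]
  · obtain ⟨hge, hpre, hmin⟩ := PySem.Chars.findFrom_natCast_spec cs pat j (by omega) h
    set r := PySem.Chars.findFrom cs pat (j : Int) none with hr
    have hrj : j + 1 ≤ r.toNat := by
      rcases Nat.lt_or_ge j r.toNat with h' | h'
      · omega
      · have : r.toNat = j := by omega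
        rw [this] at hpre; exact absurd hpre hp
    have h1 : PySem.Chars.findFrom cs pat ((j + 1 : Nat) : Int) none = r := by
      have hne : PySem.Chars.findFrom cs pat ((j + 1 : Nat) : Int) none ≠ -1 := by
        intro hcon
        exact ((PySem.Chars.findFrom_natCast_eq_neg_one_iff cs pat (j + 1) hj1).mp hcon)
          (pv_infix_drop cs pat hrj hpre)
      obtain ⟨hge', hpre', hmin'⟩ := PySem.Chars.findFrom_natCast_spec cs pat (j + 1) hj1 hne
      set r' := PySem.Chars.findFrom cs pat ((j + 1 : Nat) : Int) none with hr'
      have hle1 : r'.toNat ≤ r.toNat := by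
        by_contra hlt
        exact hmin' r.toNat hrj (by omega) hpre
      have hle2 : r.toNat ≤ r'.toNat := by
        by_contra hlt
        exact hmin r'.toNat (by omega) (by omega) hpre'
      omega
    rw [pvOccs_eq_cons cs pat j (by omega) h,
        pvOccs_eq_cons cs pat (j + 1) hj1 (by rw [h1]; exact h), h1, ← hr]

theorem pvOccs_end (cs pat : List Char) (hpat : pat ≠ []) :
    removeHeaderOccs cs pat cs.length = [] := by
  have h : PySem.Chars.findFrom cs pat ((cs.length : Nat) : Int) none = -1 := by
    rw [PySem.Chars.findFrom_natCast_eq_neg_one_iff cs pat cs.length le_rfl]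
    simp only [List.drop_length]
    intro hc
    exact hpat (List.eq_nil_of_infix_nil hc)
  exact pvOccs_eq_nil cs pat cs.length le_rfl h

-- the merged occurrence lists are a permutation of the interleaved token stream
theorem pvToks_perm (cs : List Char) (j : Nat) (hj : j ≤ cs.length) :
    List.Perm ((removeHeaderOccs cs "<div".toList j).map (fun k => (k, (1 : Int)))
            ++ (removeHeaderOccs cs "</div".toList j).map (fun k => (k, (-1 : Int))))
      (pvToks cs j) := by
  by_cases hlt : j < cs.length
  · by_cases ho : PySem.Chars.startswith (cs.drop j) "<div".toList = true
    · have hpo := (PySem.Chars.startswith_iff _ _).mp ho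
      have hcf := pv_not_both cs j ho
      have hpc : ¬ "</div".toList <+: cs.drop j := by
        intro h; rw [(PySem.Chars.startswith_iff _ _).mpr h] at hcf; simp at hcf
      rw [pvOccs_match cs _ j hj hpo, pvOccs_nomatch cs _ j hlt hpc,
          pvToks_open cs j hlt ho]
      simpa using (pvToks_perm cs (j + 1) (by omega)).cons (j, (1 : Int))
    · rw [Bool.not_eq_true] at ho
      by_cases hc : PySem.Chars.startswith (cs.drop j) "</div".toList = true
      · have hpc := (PySem.Chars.startswith_iff _ _).mp hc
        have hpo : ¬ "<div".toList <+: cs.drop j := by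
          intro h; rw [(PySem.Chars.startswith_iff _ _).mpr h] at ho; simp at ho
        rw [pvOccs_nomatch cs _ j hlt hpo, pvOccs_match cs _ j hj hpc,
            pvToks_close cs j hlt ho hc]
        simp only [List.map_cons]
        exact List.Perm.trans List.perm_middle ((pvToks_perm cs (j + 1) (by omega)).cons _)
      · rw [Bool.not_eq_true] at hc
        have hpo : ¬ "<div".toList <+: cs.drop j := by
          intro h; rw [(PySem.Chars.startswith_iff _ _).mpr h] at ho; simp at ho
        have hpc : ¬ "</div".toList <+: cs.drop j := by
          intro h; rw [(PySem.Chars.startswith_iff _ _).mpr h] at hc; simp at hc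
        rw [pvOccs_nomatch cs _ j hlt hpo, pvOccs_nomatch cs _ j hlt hpc,
            pvToks_none cs j ho hc]
        exact pvToks_perm cs (j + 1) (by omega)
  · have hjl : j = cs.length := by omega
    subst hjl
    rw [pvOccs_end cs _ (by decide), pvOccs_end cs _ (by decide), pvToks_ge cs _ le_rfl]
    simp
termination_by cs.length - j
decreasing_by all_goals omega

theorem pvToks_lb (cs : List Char) (j : Nat) : ∀ p ∈ pvToks cs j, j ≤ p.1 := by
  intro p hp
  by_cases hlt : j < cs.length
  · have hrec := pvToks_lb cs (j + 1)
    by_cases ho : PySem.Chars.startswith (cs.drop j) "<div".toList = true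
    · rw [pvToks_open cs j hlt ho] at hp
      rcases List.mem_cons.mp hp with h | h
      · simp [h]
      · exact le_trans (by omega) (hrec p h)
    · rw [Bool.not_eq_true] at ho
      by_cases hc : PySem.Chars.startswith (cs.drop j) "</div".toList = true
      · rw [pvToks_close cs j hlt ho hc] at hp
        rcases List.mem_cons.mp hp with h | h
        · simp [h]
        · exact le_trans (by omega) (hrec p h)
      · rw [Bool.not_eq_true] at hc
        rw [pvToks_none cs j ho hc] at hp
        exact le_trans (by omega) (hrec p hp)
  · rw [pvToks_ge cs j (by omega)] at hp; simp at hp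
termination_by cs.length - j
decreasing_by all_goals omega

theorem pvToks_pairwise (cs : List Char) (j : Nat) :
    (pvToks cs j).Pairwise (fun a b => a.1 < b.1) := by
  by_cases hlt : j < cs.length
  · have hrec := pvToks_pairwise cs (j + 1)
    have hlb := pvToks_lb cs (j + 1)
    by_cases ho : PySem.Chars.startswith (cs.drop j) "<div".toList = true
    · rw [pvToks_open cs j hlt ho]
      exact List.Pairwise.cons (fun b hb => by have := hlb b hb; simp; omega) hrec
    · rw [Bool.not_eq_true] at ho
      by_cases hc : PySem.Chars.startswith (cs.drop j) "</div".toList = true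
      · rw [pvToks_close cs j hlt ho hc]
        exact List.Pairwise.cons (fun b hb => by have := hlb b hb; simp; omega) hrec
      · rw [Bool.not_eq_true] at hc
        rw [pvToks_none cs j ho hc]
        exact hrec
  · rw [pvToks_ge cs j (by omega)]; simp
termination_by cs.length - j
decreasing_by all_goals omega

-- ===== VERDICT (by name: the statement is the Claim_ definition above) =====
theorem remove_header_spec : Claim_equal_remove_header := by
  unfold Claim_equal_remove_header Spec_remove_header
  intro text _
  unfold remove_header remove_header_alt
  by_cases h : PySem.Str.find text "<div className=\"border-b border-zinc-800 bg-zinc-900 px-4 py-3\">" = -1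
  · have hb : ((PySem.Str.find text "<div className=\"border-b border-zinc-800 bg-zinc-900 px-4 py-3\">") == -1) = true := by
      rw [h]; decide
    simp only [hb, if_true]
  · simp only [h, beq_iff_eq, if_neg, if_false]
    set r := PySem.Str.find text "<div className=\"border-b border-zinc-800 bg-zinc-900 px-4 py-3\">" with hr
    have hnn : 0 ≤ r := by
      rw [hr]
      exact (PySem.Str.find_nonneg_iff _ _).mpr (by
        by_contra hc
        exact h ((PySem.Str.find_eq_neg_one_iff _ _).mpr hc))
    have hle : r ≤ text.toList.length := by
      have := PySem.Chars.find_le_length text.toList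
        "<div className=\"border-b border-zinc-800 bg-zinc-900 px-4 py-3\">".toList
      simpa [hr] using this
    have hst : r.toNat ≤ text.toList.length := by omega
    refine (scanA_eq_step text r.toNat r.toNat 0).trans ?_
    exact congrArg (fun l => removeHeaderStep text.toList r.toNat text l 0)
      (PySem.List.sorted_eq_of_perm_of_pairwise_lt _ _ _
        ((pvToks_perm text.toList r.toNat hst).symm) (pvToks_pairwise text.toList r.toNat)).symm
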